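-- pv_equiv track=rewrite | github.com/pypi-data/pypi-mirror-308 | packages/sweepai/sweepai-3.1.5.tar.gz/sweepai-3.1.5/sweepai/dataclasses/code_change_stream_state.py | detect_infinite_loop_in_code_in_suggested_responses
-- ===== SOURCE A (Python) =====
-- def detect_infinite_loop_in_code_in_suggested_responses(all_suggested_responses: list[str]) -> bool:
--     """
--     Detects if the model is stuck in an infinite loop generating code suggestions. We will check if a certain state occurs >= 3 times.
--     """
--     code_suggestion_to_count = {}
--     for suggested_response in all_suggested_responses:
--         if suggested_response not in code_suggestion_to_count:
--             code_suggestion_to_count[suggested_response] = 1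
--         else:
--             code_suggestion_to_count[suggested_response] += 1
--         if code_suggestion_to_count[suggested_response] >= 3:
--             return True
--     return False
-- ===== SOURCE B (Python) =====
-- def detect_infinite_loop_in_code_in_suggested_responses(all_suggested_responses: list[str]) -> bool:
--     """
--     Detects if the model is stuck in an infinite loop generating code suggestions. We will check if a certain state occurs >= 3 times.
--     """
--     ordered = sorted(all_suggested_responses)
--     return any(a == c for a, c in zip(ordered, ordered[2:]))
-- ===== Notes on version B (the rewrite author's own statement) =====
-- stated objective: alternative
-- what changed: Replaced the incremental dict-of-counts loop with early exit by a sort-then-scan: sort a copy of the list and report whether any element equals the one two positions later (three equal elements are adjacent in sorted order).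
import Mathlib
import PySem

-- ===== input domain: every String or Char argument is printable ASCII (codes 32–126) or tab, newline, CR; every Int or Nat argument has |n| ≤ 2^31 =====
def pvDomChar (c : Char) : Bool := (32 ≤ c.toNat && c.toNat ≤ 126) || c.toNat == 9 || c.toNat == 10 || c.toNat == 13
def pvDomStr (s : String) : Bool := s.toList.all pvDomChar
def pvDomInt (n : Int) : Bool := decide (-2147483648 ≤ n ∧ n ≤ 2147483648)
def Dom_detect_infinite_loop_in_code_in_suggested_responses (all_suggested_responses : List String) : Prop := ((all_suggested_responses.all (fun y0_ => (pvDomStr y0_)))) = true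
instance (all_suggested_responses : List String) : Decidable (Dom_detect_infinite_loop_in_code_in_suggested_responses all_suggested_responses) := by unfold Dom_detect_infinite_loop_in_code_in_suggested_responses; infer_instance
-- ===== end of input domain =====

-- B replaces A's incremental dict-of-counts loop with early exit by sort-then-scan: sort a copy and
-- look for an element equal to the one two positions later (alternative decomposition; not faster).

-- ===== PORT A =====
-- A's for-loop with the running dict and the inline `return True`, as structural recursion over the list.
def pvLoopA (d : PySem.Dict String Int) : List String → Bool
  | [] => false
  | s :: rest =>
    let c := d.getD s 0 + 1
    let d' := d.insert s c
    if 3 ≤ c then true else pvLoopA d' rest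

def detect_infinite_loop_in_code_in_suggested_responses (all_suggested_responses : List String) : Bool :=
  pvLoopA PySem.Dict.empty all_suggested_responses

-- ===== PORT B =====
-- ordered = sorted(all_suggested_responses); any(a == c for a, c in zip(ordered, ordered[2:]))
def detect_infinite_loop_in_code_in_suggested_responses_alt (all_suggested_responses : List String) : Bool :=
  let ordered := PySem.List.sorted all_suggested_responses (fun x => x) false
  (ordered.zip (PySem.List.slice ordered (some 2) none)).any (fun p => p.1 == p.2)

-- ===== PRECONDITION & SPEC =====
def Spec_detect_infinite_loop_in_code_in_suggested_responses (all_suggested_responses : List String) (out : Bool) : Prop := out = detect_infinite_loop_in_code_in_suggested_responses_alt all_suggested_responses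
instance (all_suggested_responses : List String) (out : Bool) : Decidable (Spec_detect_infinite_loop_in_code_in_suggested_responses all_suggested_responses out) := by unfold Spec_detect_infinite_loop_in_code_in_suggested_responses; infer_instance

-- ===== CLAIM =====
def Claim_equal_detect_infinite_loop_in_code_in_suggested_responses : Prop := ∀ (all_suggested_responses : List String), Dom_detect_infinite_loop_in_code_in_suggested_responses all_suggested_responses → Spec_detect_infinite_loop_in_code_in_suggested_responses all_suggested_responses (detect_infinite_loop_in_code_in_suggested_responses all_suggested_responses)

-- ===== LEMMAS AND PROOFS =====

-- Loop invariant for A: with every stored count ≤ 2, A's loop returns true iff some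
-- element's stored count plus its remaining occurrences reaches 3.
theorem pvLoopA_eq (l : List String) : ∀ (d : PySem.Dict String Int),
    (∀ s, d.getD s 0 ≤ 2) →
    (pvLoopA d l = true ↔ ∃ s ∈ l, 3 ≤ d.getD s 0 + (l.count s : Int)) := by
  induction l with
  | nil => simp [pvLoopA]
  | cons s rest ih =>
    intro d hd
    simp only [pvLoopA]
    by_cases h3 : (3 : Int) ≤ d.getD s 0 + 1
    · simp only [h3, if_pos]
      constructor
      · intro _
        refine ⟨s, List.mem_cons_self .., ?_⟩
        have : (List.count s (s :: rest) : Int) = (List.count s rest : Int) + 1 := by simp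
        omega
      · intro _; trivial
    · simp only [h3, if_neg, not_false_eq_true]
      have hd' : ∀ t, (d.insert s (d.getD s 0 + 1)).getD t 0 ≤ 2 := by
        intro t
        rw [PySem.Dict.getD_insert]
        split_ifs with ht
        · omega
        · exact hd t
      rw [ih _ hd']
      constructor
      · rintro ⟨t, htmem, hle⟩
        refine ⟨t, List.mem_cons_of_mem _ htmem, ?_⟩
        rw [PySem.Dict.getD_insert] at hle
        by_cases hts : t = s
        · subst hts
          simp only at hle
          have : (List.count t (t :: rest) : Int) = (List.count t rest : Int) + 1 := by simp
          omega
        · simp only [if_neg hts] at hle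
          have : (List.count t (s :: rest) : Int) = (List.count t rest : Int) := by
            simp [Ne.symm hts]
          omega
      · rintro ⟨t, htmem, hle⟩
        by_cases hts : t = s
        · subst hts
          have hcnt : (List.count t (t :: rest) : Int) = (List.count t rest : Int) + 1 := by simp
          have htr : t ∈ rest := by
            by_contra hnr
            have : List.count t rest = 0 := List.count_eq_zero.mpr hnr
            omega
          refine ⟨t, htr, ?_⟩
          rw [PySem.Dict.getD_insert, if_pos rfl]
          omega
        · have htr : t ∈ rest := by
            rcases List.mem_cons.mp htmem with h | h
            · exact absurd h hts
            · exact h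
          refine ⟨t, htr, ?_⟩
          rw [PySem.Dict.getD_insert, if_neg hts]
          have : (List.count t (s :: rest) : Int) = (List.count t rest : Int) := by
            simp [Ne.symm hts]
          omega

-- Characterisation of B's scan: on a (≤)-sorted list, some element equals the one two
-- positions later iff some value occurs at least 3 times.
theorem triple_scan_eq (l : List String) (hs : l.Pairwise (· ≤ ·)) :
    ((l.zip (l.drop 2)).any (fun p => p.1 == p.2) = true) ↔ ∃ s, 3 ≤ l.count s := by
  induction l with
  | nil => simp
  | cons a t ih =>
    cases t with
    | nil =>
      simp only [List.drop, List.zip_nil_right, List.any_nil, Bool.false_eq_true, false_iff]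
      rintro ⟨s, hle⟩
      have := List.count_le_length (l := [a]) (a := s)
      simp at this; omega
    | cons b u =>
      cases u with
      | nil =>
        simp only [List.drop, List.zip_nil_right, List.any_nil, Bool.false_eq_true, false_iff]
        rintro ⟨s, hle⟩
        have := List.count_le_length (l := [a, b]) (a := s)
        simp at this; omega
      | cons c r =>
        -- l = a :: b :: c :: r
        have hab : a ≤ b := (List.pairwise_cons.mp hs).1 b (by simp)
        have hac : a ≤ c := (List.pairwise_cons.mp hs).1 c (by simp)
        have htail : (b :: c :: r).Pairwise (· ≤ ·) := (List.pairwise_cons.mp hs).2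
        have hbc : b ≤ c := (List.pairwise_cons.mp htail).1 c (by simp)
        have hcr : ∀ x ∈ r, c ≤ x := fun x hx =>
          (List.pairwise_cons.mp (List.pairwise_cons.mp htail).2).1 x hx
        have hzip : ((a :: b :: c :: r).zip ((a :: b :: c :: r).drop 2))
            = (a, c) :: ((b :: c :: r).zip ((b :: c :: r).drop 2)) := by
          simp [List.zip]
        rw [hzip, List.any_cons]
        by_cases hac' : a = c
        · subst hac'
          have hab' : a = b := le_antisymm hab hbc
          subst hab'
          simp only [beq_self_eq_true, Bool.true_or, true_iff]
          exact ⟨a, by simp⟩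
        · have hne : (a == c) = false := beq_eq_false_iff_ne.mpr hac'
          rw [hne, Bool.false_or, ih htail]
          constructor
          · rintro ⟨s, hle⟩
            refine ⟨s, ?_⟩
            have : (b :: c :: r).count s ≤ (a :: b :: c :: r).count s := by
              simp [List.count_cons]
            omega
          · rintro ⟨s, hle⟩
            by_cases hsa : s = a
            · subst hsa
              -- s = a cannot reach count 3: a ∉ r (else c ≤ a and a ≤ c give a = c), a ≠ c
              exfalso
              have har : s ∉ r := by
                intro hmem
                exact hac' (le_antisymm hac (hcr s hmem))
              have hr0 : r.count s = 0 := List.count_eq_zero.mpr har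
              have hcs : ¬ c = s := fun h => hac' h.symm
              have hbound : (s :: b :: c :: r).count s ≤ 2 := by
                simp [List.count_cons, hr0, hcs]
                split_ifs <;> omega
              omega
            · refine ⟨s, ?_⟩
              have : (b :: c :: r).count s = (a :: b :: c :: r).count s := by
                simp [List.count_cons, Ne.symm, hsa]
              omega

-- ===== VERDICT =====
theorem detect_infinite_loop_in_code_in_suggested_responses_spec : Claim_equal_detect_infinite_loop_in_code_in_suggested_responses := by
  intro l _
  unfold Spec_detect_infinite_loop_in_code_in_suggested_responses
  unfold detect_infinite_loop_in_code_in_suggested_responses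
  unfold detect_infinite_loop_in_code_in_suggested_responses_alt
  have hA := pvLoopA_eq l PySem.Dict.empty (by intro s; rw [PySem.Dict.getD_empty]; norm_num)
  simp only [PySem.Dict.getD_empty, zero_add] at hA
  have hperm : (PySem.List.sorted l (fun x => x) false).Perm l := PySem.List.sorted_perm l (fun x => x) false
  have hpw : (PySem.List.sorted l (fun x => x) false).Pairwise (· ≤ ·) := by
    simpa using PySem.List.sorted_pairwise l (fun x => x)
  have hslice : PySem.List.slice (PySem.List.sorted l (fun x => x) false) (some 2) none = (PySem.List.sorted l (fun x => x) false).drop 2 := by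
    simpa using PySem.List.slice_from (PySem.List.sorted l (fun x => x) false) (by norm_num : (0:Int) ≤ 2)
  simp only [hslice]
  have hB := triple_scan_eq (PySem.List.sorted l (fun x => x) false) hpw
  rcases hAB : pvLoopA PySem.Dict.empty l with _ | _
  · symm
    rw [Bool.eq_false_iff]
    intro htrue
    rcases hB.mp htrue with ⟨s, hle⟩
    rw [hperm.count_eq] at hle
    have hmem : s ∈ l := List.count_pos_iff.mp (by omega)
    have : pvLoopA PySem.Dict.empty l = true := hA.mpr ⟨s, hmem, by exact_mod_cast hle⟩
    rw [hAB] at this; exact absurd this (by simp)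
  · symm
    rcases hA.mp hAB with ⟨s, _, hle⟩
    refine hB.mpr ⟨s, ?_⟩
    rw [hperm.count_eq]
    exact_mod_cast hle
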